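-- pv_equiv track=rewrite | github.com/pypi-data/pypi-mirror-342 | packages/geo-track-analyzer/geo_track_analyzer-1.7.0.tar.gz/geo_track_analyzer-1.7.0/geo_track_analyzer/compare.py | _extract_ranges
-- ===== SOURCE A (Python) =====
-- def _extract_ranges(
--     base_points_in_bounds: list[tuple[int, bool]], allow_points_outside_bounds: int
-- ) -> list[tuple[int, int]]:
--     """Extract point ranges from a list of indices and boolan flags"""
--     id_ranges_in_bounds: list[tuple[int, int]] = []
--     found_range = False
--     in_bound_range_start = -1
--     points_since_last_range = 0
--     idx = 0
--     for idx, in_bounds in base_points_in_bounds: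
--         if in_bounds and not found_range:
--             # Start of in_bound_points
--             found_range = True
--             if (
--                 points_since_last_range <= allow_points_outside_bounds
--                 and id_ranges_in_bounds
--             ):
--                 prev_range_start, _ = id_ranges_in_bounds.pop()
--                 in_bound_range_start = prev_range_start
--             else:
--                 in_bound_range_start = idx
--         if not in_bounds:
--             if found_range:
--                 # End of in_bound_points
--                 found_range = False
--                 id_ranges_in_bounds.append((in_bound_range_start, idx - 1))
--                 points_since_last_range = 0
--             points_since_last_range += 1
--     if found_range:
--         id_ranges_in_bounds.append((in_bound_range_start, idx))
--
--     return id_ranges_in_bounds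
-- ===== SOURCE B (Python) =====
-- def _extract_ranges(
--     base_points_in_bounds: list[tuple[int, bool]], allow_points_outside_bounds: int
-- ) -> list[tuple[int, int]]:
--     # Pass 1: collect maximal in-bounds runs as (gap_before, start, end).
--     runs = []
--     open_run = None  # (gap_before, start) of the run currently open
--     gap = 0  # out-of-bounds points seen since the last run was closed
--     for idx, in_bounds in base_points_in_bounds:
--         if in_bounds:
--             if open_run is None:
--                 open_run = (gap, idx)
--         else:
--             if open_run is not None:
--                 runs.append((open_run[0], open_run[1], idx - 1))
--                 open_run = None
--                 gap = 0
--             gap += 1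
--     if open_run is not None:
--         runs.append((open_run[0], open_run[1], base_points_in_bounds[-1][0]))
--     # Pass 2: merge a run into the previous output range when its gap is small.
--     out = []
--     for g, s, e in runs:
--         if g <= allow_points_outside_bounds and out:
--             out[-1] = (out[-1][0], e)
--         else:
--             out.append((s, e))
--     return out
-- ===== Notes on version B (the rewrite author's own statement) =====
-- stated objective: alternative
-- what changed: Replaces A's single stateful loop that merges by popping the last emitted range in-place with a two-pass decomposition: pass one collects maximal in-bounds runs together with the gap count preceding each, pass two merges consecutive runs whose gap is within the allowance.
import Mathlib
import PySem

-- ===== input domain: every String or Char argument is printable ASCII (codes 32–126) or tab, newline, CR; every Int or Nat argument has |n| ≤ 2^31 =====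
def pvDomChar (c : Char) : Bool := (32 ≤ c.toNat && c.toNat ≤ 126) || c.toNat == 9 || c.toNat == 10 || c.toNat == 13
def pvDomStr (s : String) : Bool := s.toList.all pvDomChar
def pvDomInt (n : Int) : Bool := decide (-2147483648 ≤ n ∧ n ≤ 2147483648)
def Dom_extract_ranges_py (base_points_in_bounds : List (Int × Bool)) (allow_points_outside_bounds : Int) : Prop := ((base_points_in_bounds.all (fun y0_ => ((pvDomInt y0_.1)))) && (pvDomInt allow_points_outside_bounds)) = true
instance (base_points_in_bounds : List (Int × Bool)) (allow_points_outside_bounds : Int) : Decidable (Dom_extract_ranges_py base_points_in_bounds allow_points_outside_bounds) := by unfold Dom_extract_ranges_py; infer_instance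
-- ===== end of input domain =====

-- B replaces A's single stateful loop (with in-place pop/merge) by two passes: collect maximal
-- in-bounds runs with their preceding gap counts, then merge consecutive runs; objective: alternative.

-- ===== PORT A =====
-- state: (id_ranges_in_bounds, found_range, in_bound_range_start, points_since_last_range, idx)
def stepA (allow : Int) (st : List (Int × Int) × Bool × Int × Int × Int) (p : Int × Bool) :
    List (Int × Int) × Bool × Int × Int × Int :=
  let (ranges, found, start, gap, _) := st
  let (idx, inb) := p
  -- if in_bounds and not found_range
  let (ranges, found, start) :=
    if inb = true ∧ ¬ found = true then
      if gap ≤ allow ∧ ranges ≠ [] then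
        -- prev_range_start, _ = id_ranges_in_bounds.pop(); start = prev_range_start
        (ranges.dropLast, true, (ranges.getLast!).1)
      else (ranges, true, idx)
    else (ranges, found, start)
  -- if not in_bounds
  let (ranges, found, gap) :=
    if ¬ inb = true then
      if found = true then (ranges ++ [(start, idx - 1)], false, (0 : Int) + 1)
      else (ranges, found, gap + 1)
    else (ranges, found, gap)
  (ranges, found, start, gap, idx)

def extract_ranges_py (base_points_in_bounds : List (Int × Bool)) (allow_points_outside_bounds : Int) : List (Int × Int) :=
  let st := base_points_in_bounds.foldl (stepA allow_points_outside_bounds) ([], false, -1, 0, 0)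
  let (ranges, found, start, _, idx) := st
  if found = true then ranges ++ [(start, idx)] else ranges

-- ===== PORT B =====
-- out[-1] = (out[-1][0], e)
def setLastEnd : List (Int × Int) → Int → List (Int × Int)
  | [], _ => []
  | [(s, _)], e => [(s, e)]
  | x :: xs, e => x :: setLastEnd xs e

-- pass-1 step; state: (runs, open_run, gap)
def stepB (st : List (Int × Int × Int) × Option (Int × Int) × Int) (p : Int × Bool) :
    List (Int × Int × Int) × Option (Int × Int) × Int :=
  let (runs, opn, gap) := st
  let (idx, inb) := p
  if inb = true then
    match opn with
    | none => (runs, some (gap, idx), gap)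
    | some o => (runs, some o, gap)
  else
    match opn with
    | some (sg, s) => (runs ++ [(sg, s, idx - 1)], none, 1)
    | none => (runs, none, gap + 1)

-- pass-2 step
def mergeStep (allow : Int) (out : List (Int × Int)) (r : Int × Int × Int) : List (Int × Int) :=
  let (g, s, e) := r
  if g ≤ allow ∧ out ≠ [] then setLastEnd out e else out ++ [(s, e)]

def extract_ranges_py_alt (base_points_in_bounds : List (Int × Bool)) (allow_points_outside_bounds : Int) : List (Int × Int) :=
  let (runs, opn, _) := base_points_in_bounds.foldl stepB ([], none, 0)
  let runs :=
    match opn with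
    | some (sg, s) => runs ++ [(sg, s, (base_points_in_bounds.getLast!).1)]
    | none => runs
  runs.foldl (mergeStep allow_points_outside_bounds) []

-- ===== PRECONDITION & SPEC =====
def Spec_extract_ranges_py (base_points_in_bounds : List (Int × Bool)) (allow_points_outside_bounds : Int) (out : List (Int × Int)) : Prop := out = extract_ranges_py_alt base_points_in_bounds allow_points_outside_bounds
instance (base_points_in_bounds : List (Int × Bool)) (allow_points_outside_bounds : Int) (out : List (Int × Int)) : Decidable (Spec_extract_ranges_py base_points_in_bounds allow_points_outside_bounds out) := by unfold Spec_extract_ranges_py; infer_instance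

-- ===== CLAIM (what is proved, stated in full; the proofs are below) =====
def Claim_equal_extract_ranges_py : Prop := ∀ (base_points_in_bounds : List (Int × Bool)) (allow_points_outside_bounds : Int), Dom_extract_ranges_py base_points_in_bounds allow_points_outside_bounds → Spec_extract_ranges_py base_points_in_bounds allow_points_outside_bounds (extract_ranges_py base_points_in_bounds allow_points_outside_bounds)

-- ===== LEMMAS AND PROOFS =====

theorem getLast!_cons_cons' (x y : Int × Int) (ys : List (Int × Int)) :
    (x :: y :: ys).getLast! = (y :: ys).getLast! := by
  simp [List.getLast!]

theorem setLastEnd_eq (out : List (Int × Int)) (h : out ≠ []) (e : Int) :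
    setLastEnd out e = out.dropLast ++ [((out.getLast!).1, e)] := by
  induction out with
  | nil => exact absurd rfl h
  | cons x xs ih =>
    cases xs with
    | nil => cases x; simp [setLastEnd, List.getLast!]
    | cons y ys =>
      have h' : (y :: ys : List (Int × Int)) ≠ [] := by simp
      rw [show setLastEnd (x :: y :: ys) e = x :: setLastEnd (y :: ys) e from rfl, ih h',
        getLast!_cons_cons']
      simp

-- invariant relating A's loop state to B's pass-1 state (via the pass-2 merge of the runs so far)
def RelAB (allow : Int) (ranges : List (Int × Int)) (found : Bool) (start : Int)
    (runs : List (Int × Int × Int)) (opn : Option (Int × Int)) : Prop :=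
  let out := runs.foldl (mergeStep allow) []
  match opn with
  | none => found = false ∧ ranges = out
  | some (sg, s) =>
      found = true ∧
      (if sg ≤ allow ∧ out ≠ [] then ranges = out.dropLast ∧ start = (out.getLast!).1
       else ranges = out ∧ start = s)

-- closing the open run on both sides gives the same ranges list
theorem close_eq (allow : Int) (ranges : List (Int × Int)) (found : Bool) (start : Int)
    (runs : List (Int × Int × Int)) (sg s e : Int)
    (h : RelAB allow ranges found start runs (some (sg, s))) :
    ranges ++ [(start, e)] = (runs ++ [(sg, s, e)]).foldl (mergeStep allow) [] := by
  rw [List.foldl_append, List.foldl_cons, List.foldl_nil]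
  simp only [RelAB] at h
  set out := runs.foldl (mergeStep allow) [] with hout
  show ranges ++ [(start, e)] = mergeStep allow out (sg, s, e)
  by_cases hc : sg ≤ allow ∧ out ≠ []
  · have h12 : ranges = out.dropLast ∧ start = (out.getLast!).1 := by
      have := h.2; rwa [if_pos hc] at this
    rw [h12.1, h12.2, show mergeStep allow out (sg, s, e) = setLastEnd out e by
      simp [mergeStep, hc], setLastEnd_eq out hc.2 e]
  · have h12 : ranges = out ∧ start = s := by
      have := h.2; rwa [if_neg hc] at this
    rw [h12.1, h12.2, show mergeStep allow out (sg, s, e) = out ++ [(s, e)] by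
      simp [mergeStep]; intro h1 h2; exact absurd ⟨h1, h2⟩ hc]

-- index of the last element of l, defaulting to d
def lastIdx (l : List (Int × Bool)) (d : Int) : Int :=
  ((l.getLast?).map Prod.fst).getD d

theorem lastIdx_cons (p : Int × Bool) (l : List (Int × Bool)) (d : Int) :
    lastIdx (p :: l) d = lastIdx l p.1 := by
  cases l with
  | nil => simp [lastIdx]
  | cons q t =>
    simp only [lastIdx, List.getLast?_cons_cons]
    cases hl : (q :: t).getLast? with
    | none => simp [List.getLast?_eq_none_iff] at hl
    | some r => simp

-- evaluation lemmas for the two step functions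
theorem stepA_in_closed_merge (allow : Int) (ranges : List (Int × Int))
    (start gap idx pidx : Int) (hc : gap ≤ allow ∧ ranges ≠ []) :
    stepA allow (ranges, false, start, gap, idx) (pidx, true)
      = (ranges.dropLast, true, (ranges.getLast!).1, gap, pidx) := by
  simp [stepA, hc]

theorem stepA_in_closed_new (allow : Int) (ranges : List (Int × Int))
    (start gap idx pidx : Int) (hc : ¬ (gap ≤ allow ∧ ranges ≠ [])) :
    stepA allow (ranges, false, start, gap, idx) (pidx, true)
      = (ranges, true, pidx, gap, pidx) := by
  simp [stepA, hc]

theorem stepA_in_open (allow : Int) (ranges : List (Int × Int))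
    (start gap idx pidx : Int) :
    stepA allow (ranges, true, start, gap, idx) (pidx, true)
      = (ranges, true, start, gap, pidx) := by
  simp [stepA]

theorem stepA_out_open (allow : Int) (ranges : List (Int × Int))
    (start gap idx pidx : Int) :
    stepA allow (ranges, true, start, gap, idx) (pidx, false)
      = (ranges ++ [(start, pidx - 1)], false, start, 0 + 1, pidx) := by
  simp [stepA]

theorem stepA_out_closed (allow : Int) (ranges : List (Int × Int))
    (start gap idx pidx : Int) :
    stepA allow (ranges, false, start, gap, idx) (pidx, false)
      = (ranges, false, start, gap + 1, pidx) := by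
  simp [stepA]

-- main induction: both folds, finished, agree from any RelAB-related pair of states
theorem main_inv (allow : Int) :
    ∀ (l : List (Int × Bool)) (ranges : List (Int × Int)) (found : Bool) (start gap idx : Int)
      (runs : List (Int × Int × Int)) (opn : Option (Int × Int)),
      RelAB allow ranges found start runs opn →
      (let (ranges', found', start', _, idx') := l.foldl (stepA allow) (ranges, found, start, gap, idx)
       if found' = true then ranges' ++ [(start', idx')] else ranges')
      = (let (runs', opn', _) := l.foldl stepB (runs, opn, gap)
         (match opn' with
          | some (sg, s) => runs' ++ [(sg, s, lastIdx l idx)]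
          | none => runs').foldl (mergeStep allow) []) := by
  intro l
  induction l with
  | nil =>
    intro ranges found start gap idx runs opn h
    simp only [List.foldl_nil]
    cases opn with
    | none =>
      obtain ⟨h1, h2⟩ := h
      simp [h1, h2]
    | some o =>
      obtain ⟨sg, s⟩ := o
      have hf : found = true := h.1
      simp only [hf, lastIdx, List.getLast?_nil, Option.map_none, Option.getD_none]
      simpa using close_eq allow ranges found start runs sg s idx h
  | cons p t ih =>
    intro ranges found start gap idx runs opn h
    obtain ⟨pidx, pinb⟩ := p
    rw [List.foldl_cons, List.foldl_cons, lastIdx_cons]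
    cases pinb with
    | true =>
      cases opn with
      | none =>
        obtain ⟨h1, h2⟩ := h
        subst h1
        subst h2
        have hB : stepB (runs, none, gap) (pidx, true) = (runs, some (gap, pidx), gap) := rfl
        rw [hB]
        by_cases hc : gap ≤ allow ∧ runs.foldl (mergeStep allow) [] ≠ []
        · rw [stepA_in_closed_merge allow _ start gap idx pidx hc]
          apply ih
          simp only [RelAB]
          rw [if_pos hc]
          exact ⟨by trivial, by trivial, by trivial⟩
        · rw [stepA_in_closed_new allow _ start gap idx pidx hc]
          apply ih
          simp only [RelAB]
          rw [if_neg hc]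
          exact ⟨by trivial, by trivial, by trivial⟩
      | some o =>
        obtain ⟨sg, s⟩ := o
        have hf : found = true := h.1
        subst hf
        have hB : stepB (runs, some (sg, s), gap) (pidx, true) = (runs, some (sg, s), gap) := rfl
        rw [stepA_in_open, hB]
        exact ih _ _ _ _ _ _ _ h
    | false =>
      cases opn with
      | none =>
        obtain ⟨h1, h2⟩ := h
        subst h1
        have hB : stepB (runs, none, gap) (pidx, false) = (runs, none, gap + 1) := rfl
        rw [stepA_out_closed, hB]
        exact ih _ _ _ _ _ _ _ ⟨by trivial, h2⟩
      | some o =>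
        obtain ⟨sg, s⟩ := o
        have hf : found = true := h.1
        subst hf
        have hB : stepB (runs, some (sg, s), gap) (pidx, false)
            = (runs ++ [(sg, s, pidx - 1)], none, 1) := rfl
        rw [stepA_out_open, hB]
        have hcl := close_eq allow ranges true start runs sg s (pidx - 1) h
        rw [show (0 : Int) + 1 = 1 from by ring]
        exact ih _ _ _ _ _ _ _ ⟨by trivial, hcl⟩

-- ===== VERDICT (by name: the statement is the Claim_ definition above) =====
theorem extract_ranges_py_spec : Claim_equal_extract_ranges_py := by
  intro l allow _
  show extract_ranges_py l allow = extract_ranges_py_alt l allow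
  have h := main_inv allow l [] false (-1) 0 0 [] none ⟨rfl, rfl⟩
  unfold extract_ranges_py extract_ranges_py_alt
  cases l with
  | nil => rfl
  | cons p t =>
    have hlast : lastIdx (p :: t) 0 = (((p :: t).getLast!) : Int × Bool).1 := by
      cases hl : (p :: t).getLast? with
      | none => simp [List.getLast?_eq_none_iff] at hl
      | some q =>
        have hne : (p :: t) ≠ ([] : List (Int × Bool)) := by simp
        have h2 : (p :: t).getLast? = some ((p :: t).getLast hne) :=
          List.getLast?_eq_some_getLast hne
        rw [hl] at h2
        injection h2 with h3
        simp [lastIdx, hl, List.getLast!, ← h3]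
    rw [hlast] at h
    exact h
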